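-- pv_equiv track=rewrite | github.com/26remph/algorithms | leetcode/yandex/premium/356_line_reflection.py | way1_isReflected
-- ===== SOURCE A (Python) =====
-- from typing import List
--
-- def way1_isReflected(points: List[List[int]]) -> bool:
--     min_x, max_x = float("inf"), float("-inf")
--     point_set = set()
--     for x, y in points:
--         min_x = min(min_x, x)
--         max_x = max(max_x, x)
--         point_set.add((x, y))
--     s = min_x + max_x
--     for x, y in points:
--         if (s - x, y) not in point_set:
--             return False
--     return True
-- ===== SOURCE B (Python) =====
-- def way1_isReflected(points):
--     if not points:
--         return True
--     min_x = max_x = points[0][0]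
--     groups = {}
--     for x, y in points:
--         if x < min_x:
--             min_x = x
--         if max_x < x:
--             max_x = x
--         groups.setdefault(y, set()).add(x)
--     s = min_x + max_x
--     for g in groups.values():
--         srt = sorted(g)
--         if srt != [s - x for x in reversed(srt)]:
--             return False
--     return True
-- ===== Notes on version B (the rewrite author's own statement) =====
-- stated objective: alternative
-- what changed: Replaces A's global point-set membership test per point by grouping unique x-values per y in a dict and checking each sorted group equals its own reflection (reverse mapped through s - x).
import Mathlib
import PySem

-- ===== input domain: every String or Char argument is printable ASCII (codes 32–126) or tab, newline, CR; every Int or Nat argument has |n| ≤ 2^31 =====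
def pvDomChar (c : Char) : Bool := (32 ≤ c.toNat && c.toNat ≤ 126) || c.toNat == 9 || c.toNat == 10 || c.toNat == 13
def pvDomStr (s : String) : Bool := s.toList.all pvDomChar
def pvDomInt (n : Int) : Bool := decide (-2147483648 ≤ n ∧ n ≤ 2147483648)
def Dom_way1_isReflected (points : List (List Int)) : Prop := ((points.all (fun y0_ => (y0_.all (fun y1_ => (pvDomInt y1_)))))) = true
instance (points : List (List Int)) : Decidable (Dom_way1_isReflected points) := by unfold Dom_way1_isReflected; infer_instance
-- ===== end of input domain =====

-- B groups the distinct x-values per y-coordinate in a dict and checks each sorted group equals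
-- its own reflection, instead of A's per-point membership test in a global point set.

-- ===== PORT A =====
-- Python's float('inf')/float('-inf') starting values are modelled by Option Int (none = not yet
-- seen); when points is empty the second loop runs zero times, matching the `| _, _ => true` arm.
def way1_isReflected (points : List (List Int)) : Bool :=
  let st : Option Int × Option Int × PySem.Set (Int × Int) :=
    points.foldl (fun acc p =>
      let x := PySem.List.pyGetD p 0 0
      let y := PySem.List.pyGetD p 1 0
      (some (match acc.1 with | none => x | some m => min m x),
       some (match acc.2.1 with | none => x | some m => max m x),
       PySem.Set.add acc.2.2 (x, y)))
      (none, none, PySem.Set.empty)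
  match st.1, st.2.1 with
  | some mn, some mx =>
    let s := mn + mx
    points.all (fun p =>
      let x := PySem.List.pyGetD p 0 0
      let y := PySem.List.pyGetD p 1 0
      PySem.Set.contains st.2.2 (s - x, y))
  | _, _ => true

-- ===== PORT B =====
def way1_isReflected_alt (points : List (List Int)) : Bool :=
  match points with
  | [] => true
  | p0 :: _ =>
    let x0 := PySem.List.pyGetD p0 0 0
    let st : Int × Int × PySem.Dict Int (PySem.Set Int) :=
      points.foldl (fun acc p =>
        let x := PySem.List.pyGetD p 0 0
        let y := PySem.List.pyGetD p 1 0
        (if x < acc.1 then x else acc.1,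
         if acc.2.1 < x then x else acc.2.1,
         PySem.Dict.modify acc.2.2 y [] (fun g => PySem.Set.add g x)))
        (x0, x0, PySem.Dict.empty)
    let s := st.1 + st.2.1
    (PySem.Dict.values st.2.2).all (fun g =>
      let srt := PySem.List.sorted g (fun x => x) false
      srt == srt.reverse.map (fun x => s - x))

-- ===== PRECONDITION & SPEC =====
-- Pre_ excludes inner lists whose length is not 2: Python's `for x, y in points` raises ValueError there (in both A and B).
def Pre_way1_isReflected (points : List (List Int)) : Prop :=
  ∀ p ∈ points, p.length = 2
instance (points : List (List Int)) : Decidable (Pre_way1_isReflected points) := by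
  unfold Pre_way1_isReflected; infer_instance

def pvWitness_way1_isReflected : List (List Int) := [[0, 1], [2, 1], [1, 5]]

def Spec_way1_isReflected (points : List (List Int)) (out : Bool) : Prop := out = way1_isReflected_alt points
instance (points : List (List Int)) (out : Bool) : Decidable (Spec_way1_isReflected points out) := by unfold Spec_way1_isReflected; infer_instance

-- ===== CLAIM (what is proved, stated in full; the proofs are below) =====
def Claim_equal_way1_isReflected : Prop := ∀ (points : List (List Int)), Dom_way1_isReflected points → Pre_way1_isReflected points → Spec_way1_isReflected points (way1_isReflected points)

-- ===== LEMMAS AND PROOFS =====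

-- The pair a point contributes, its two coordinates, and the x-values of a y-group.
def pvPt (p : List Int) : Int × Int := (PySem.List.pyGetD p 0 0, PySem.List.pyGetD p 1 0)
def pvX (p : List Int) : Int := PySem.List.pyGetD p 0 0
def pvY (p : List Int) : Int := PySem.List.pyGetD p 1 0

def pvXsOf (P : List (Int × Int)) (y : Int) : List Int :=
  (P.filter (fun q => q.2 == y)).map (·.1)

theorem pvXsOf_cons (q : Int × Int) (P : List (Int × Int)) (y : Int) :
    pvXsOf (q :: P) y = if q.2 = y then q.1 :: pvXsOf P y else pvXsOf P y := by
  simp [pvXsOf, List.filter_cons]; split_ifs <;> simp_all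

theorem pv_pairmem (P : List (Int × Int)) (a y : Int) :
    (a, y) ∈ P ↔ a ∈ pvXsOf P y := by
  simp only [pvXsOf, List.mem_map, List.mem_filter, beq_iff_eq]
  constructor
  · intro h; exact ⟨(a, y), ⟨h, rfl⟩, rfl⟩
  · rintro ⟨⟨u, v⟩, ⟨hm, hv⟩, hu⟩
    simp_all

-- regrouping A's global condition into per-y-group conditions
theorem pv_regroup (P : List (Int × Int)) (s : Int) :
    (∀ q ∈ P, (s - q.1, q.2) ∈ P) ↔
      (∀ y ∈ P.map (·.2), ∀ x ∈ pvXsOf P y, s - x ∈ pvXsOf P y) := by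
  constructor
  · intro h y _ x hx
    have hq : (x, y) ∈ P := (pv_pairmem P x y).mpr hx
    exact (pv_pairmem P (s - x) y).mp (h (x, y) hq)
  · intro h q hq
    have hy : q.2 ∈ P.map (·.2) := List.mem_map.mpr ⟨q, hq, rfl⟩
    have hx : q.1 ∈ pvXsOf P q.2 := (pv_pairmem P q.1 q.2).mp (by simpa using hq)
    exact (pv_pairmem P (s - q.1) q.2).mpr (h q.2 hy q.1 hx)

-- core: closure of a nodup set of x-values under x ↦ s - x is exactly the sorted
-- "reflection palindrome" check B performs
theorem pv_core (X : List Int) (hX : X.Nodup) (s : Int) :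
    (∀ x ∈ X, s - x ∈ X) ↔
      PySem.List.sorted X (fun x => x) false
        = (PySem.List.sorted X (fun x => x) false).reverse.map (fun x => s - x) := by
  set l := PySem.List.sorted X (fun x => x) false with hl
  have hmeml : ∀ x, x ∈ l ↔ x ∈ X := fun x => PySem.List.mem_sorted ..
  have hperm : l.Perm X := PySem.List.sorted_perm ..
  have hndl : l.Nodup := hperm.nodup_iff.mpr hX
  have hle : l.Pairwise (· ≤ ·) := PySem.List.sorted_pairwise ..
  have hlt : l.Pairwise (· < ·) :=
    (hle.and hndl).imp (fun h => lt_of_le_of_ne h.1 h.2)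
  constructor
  · intro h
    set l' := l.reverse.map (fun x => s - x) with hl'
    have hmem' : ∀ z, z ∈ l' ↔ z ∈ l := by
      intro z
      simp only [hl', List.mem_map, List.mem_reverse]
      constructor
      · rintro ⟨w, hw, rfl⟩
        exact (hmeml _).mpr (h w ((hmeml w).mp hw))
      · intro hz
        refine ⟨s - z, (hmeml _).mpr (h z ((hmeml z).mp hz)), by ring⟩
    have hnd' : l'.Nodup := by
      refine (List.nodup_reverse.mpr hndl).map ?_
      intro a b hab; dsimp only at hab; omega
    have hlt' : l'.Pairwise (· < ·) := by
      rw [hl', List.pairwise_map, List.pairwise_reverse]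
      exact hlt.imp (fun {a b} h => by omega)
    have hp : l.Perm l' := (List.perm_ext_iff_of_nodup hndl hnd').mpr (fun a => (hmem' a).symm)
    exact List.Perm.eq_of_pairwise' (r := (· ≤ ·)) (hlt.imp le_of_lt) (hlt'.imp le_of_lt) hp
  · intro h x hx
    obtain ⟨i, hi, rfl⟩ := List.mem_iff_getElem.mp ((hmeml x).mpr hx)
    have hj : l.length - 1 - i < l.length := by omega
    have hv : l[i] = s - l[l.length - 1 - i] := by
      have hc := List.getElem_of_eq h hi
      simpa [List.getElem_reverse] using hc
    refine (hmeml _).mp ?_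
    have hv' : s - l[i] = l[l.length - 1 - i]'hj := by omega
    rw [hv']; exact List.getElem_mem hj

-- A's single fold splits into min-fold, max-fold and set-building fold
theorem pv_foldA_decomp (ps : List (List Int)) (a b : Int) (c : PySem.Set (Int × Int)) :
    ps.foldl (fun acc p =>
      let x := PySem.List.pyGetD p 0 0
      let y := PySem.List.pyGetD p 1 0
      ((some (match acc.1 with | none => x | some m => min m x) : Option Int),
       (some (match acc.2.1 with | none => x | some m => max m x) : Option Int),
       PySem.Set.add acc.2.2 (x, y))) (some a, some b, c) =
    (some ((ps.map pvX).foldl min a),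
     some ((ps.map pvX).foldl max b),
     PySem.Set.update c (ps.map pvPt)) := by
  induction ps generalizing a b c with
  | nil => simp [PySem.Set.update]
  | cons p ps ih =>
    simp only [List.foldl_cons, List.map_cons]
    rw [ih]
    simp [pvX, pvPt, PySem.Set.update]

-- B's single fold splits likewise (and its running min/max agree with `min`/`max`)
theorem pv_foldB_decomp (ps : List (List Int)) (a b : Int) (d : PySem.Dict Int (PySem.Set Int)) :
    ps.foldl (fun acc p =>
      let x := PySem.List.pyGetD p 0 0
      let y := PySem.List.pyGetD p 1 0
      ((if x < acc.1 then x else acc.1),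
       (if acc.2.1 < x then x else acc.2.1),
       PySem.Dict.modify acc.2.2 y [] (fun g => PySem.Set.add g x))) (a, b, d) =
    ((ps.map pvX).foldl min a,
     (ps.map pvX).foldl max b,
     ps.foldl (fun d p => PySem.Dict.modify d (pvY p) [] (fun g => PySem.Set.add g (pvX p))) d) := by
  induction ps generalizing a b d with
  | nil => simp
  | cons p ps ih =>
    simp only [List.foldl_cons, List.map_cons]
    rw [ih]
    have hmin : (if PySem.List.pyGetD p 0 0 < a then PySem.List.pyGetD p 0 0 else a)
        = min a (pvX p) := by simp only [pvX, min_def]; split_ifs <;> omega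
    have hmax : (if b < PySem.List.pyGetD p 0 0 then PySem.List.pyGetD p 0 0 else b)
        = max b (pvX p) := by simp only [pvX, max_def]; split_ifs <;> omega
    simp [hmin, hmax, pvX, pvY]

-- the y-group a key holds after B's dict-building fold
theorem pv_getD_group (ps : List (List Int)) (d : PySem.Dict Int (PySem.Set Int)) (y : Int) :
    (ps.foldl (fun d p => PySem.Dict.modify d (pvY p) [] (fun g => PySem.Set.add g (pvX p))) d).getD y []
      = PySem.Set.update (d.getD y []) (pvXsOf (ps.map pvPt) y) := by
  induction ps generalizing d with
  | nil => simp [PySem.Set.update, pvXsOf]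
  | cons p ps ih =>
    simp only [List.foldl_cons, List.map_cons]
    rw [ih]
    rw [pvXsOf_cons]
    have hy : (pvPt p).2 = pvY p := rfl
    have hx : (pvPt p).1 = pvX p := rfl
    rw [hy, hx]
    by_cases h : pvY p = y
    · subst h
      rw [if_pos rfl, PySem.Dict.getD_modify, if_pos rfl, PySem.Set.update_cons]
    · rw [if_neg h, PySem.Dict.getD_modify, if_neg (fun hc => h hc.symm)]

theorem pv_keys_group (ps : List (List Int)) :
    (ps.foldl (fun d p => PySem.Dict.modify d (pvY p) [] (fun g => PySem.Set.add g (pvX p))) PySem.Dict.empty).keys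
      = PySem.Set.ofList (ps.map pvY) := by
  rw [PySem.Dict.keys_foldl_modify_key (key := pvY)]
  simp [PySem.Dict.keys_empty, PySem.Set.update_nil_left]

theorem pv_nodup_keys_group (ps : List (List Int)) :
    (ps.foldl (fun d p => PySem.Dict.modify d (pvY p) [] (fun g => PySem.Set.add g (pvX p))) PySem.Dict.empty).keys.Nodup :=
  PySem.Dict.nodup_keys_foldl_modify_key _ _ _ _ _ (by simp [PySem.Dict.keys_empty])

theorem way1_isReflected_main (points : List (List Int)) :
    way1_isReflected points = way1_isReflected_alt points := by
  cases points with
  | nil => rfl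
  | cons p0 rest =>
    unfold way1_isReflected way1_isReflected_alt
    simp only [List.foldl_cons]
    rw [show (if PySem.List.pyGetD p0 0 0 < PySem.List.pyGetD p0 0 0 then PySem.List.pyGetD p0 0 0
          else PySem.List.pyGetD p0 0 0) = PySem.List.pyGetD p0 0 0 from by simp]
    rw [pv_foldA_decomp, pv_foldB_decomp]
    dsimp only
    have hD : (rest.foldl (fun d p => PySem.Dict.modify d (pvY p) [] fun g => PySem.Set.add g (pvX p))
        (PySem.Dict.empty.modify (PySem.List.pyGetD p0 1 0) [] fun g => PySem.Set.add g (PySem.List.pyGetD p0 0 0)))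
        = (p0 :: rest).foldl (fun d p => PySem.Dict.modify d (pvY p) [] (fun g => PySem.Set.add g (pvX p))) PySem.Dict.empty := rfl
    rw [hD]
    rw [PySem.Dict.values_eq_map_keys _ (pv_nodup_keys_group (p0 :: rest)) []]
    rw [pv_keys_group, List.all_map]
    rw [Bool.eq_iff_iff]
    simp only [List.all_eq_true, Function.comp, PySem.Set.contains_iff, pv_getD_group,
      PySem.Dict.getD_empty, PySem.Set.update_nil_left, beq_iff_eq, PySem.Set.mem_ofList,
      PySem.Set.mem_update, PySem.Set.mem_add, PySem.Set.empty, List.not_mem_nil, false_or]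
    generalize List.foldl min (PySem.List.pyGetD p0 0 0) (List.map pvX rest) +
      List.foldl max (PySem.List.pyGetD p0 0 0) (List.map pvX rest) = s
    have hpt : (PySem.List.pyGetD p0 0 0, PySem.List.pyGetD p0 1 0) = pvPt p0 := rfl
    rw [hpt]
    simp only [← List.mem_cons, ← List.map_cons]
    have hy2 : List.map pvY (p0 :: rest) = (List.map pvPt (p0 :: rest)).map (fun q => q.2) := by
      rw [List.map_map]; rfl
    rw [hy2]
    have hAiff : (∀ p ∈ p0 :: rest,
        (s - PySem.List.pyGetD p 0 0, PySem.List.pyGetD p 1 0) ∈ List.map pvPt (p0 :: rest)) ↔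
        (∀ q ∈ List.map pvPt (p0 :: rest), (s - q.1, q.2) ∈ List.map pvPt (p0 :: rest)) := by
      constructor
      · intro h q hq
        obtain ⟨p, hp, rfl⟩ := List.mem_map.mp hq
        exact h p hp
      · intro h p hp
        exact h (pvPt p) (List.mem_map.mpr ⟨p, hp, rfl⟩)
    rw [hAiff, pv_regroup _ s]
    refine forall_congr' (fun y => imp_congr_right (fun _ => ?_))
    have hb : (∀ x ∈ pvXsOf (List.map pvPt (p0 :: rest)) y, s - x ∈ pvXsOf (List.map pvPt (p0 :: rest)) y)
        ↔ (∀ x ∈ PySem.Set.ofList (pvXsOf (List.map pvPt (p0 :: rest)) y),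
            s - x ∈ PySem.Set.ofList (pvXsOf (List.map pvPt (p0 :: rest)) y)) := by
      simp [PySem.Set.mem_ofList]
    rw [hb, pv_core _ (PySem.Set.nodup_ofList _) s]

-- ===== VERDICT (by name: the statement is the Claim_ definition above) =====
theorem way1_isReflected_spec : Claim_equal_way1_isReflected := by
  intro points _ _
  exact way1_isReflected_main points
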